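-- pv_equiv track=rewrite | github.com/Kanscape/Echogram | extensions/bilibili/bilibili_support.py | _pick_preferred_subtitle
-- ===== SOURCE A (Python) =====
-- _LANGUAGE_PRIORITY = ("zh-CN", "zh-Hans", "ai-zh")
--
-- def _pick_preferred_subtitle(subtitles: list[dict]) -> dict | None:
--     if not subtitles:
--         return None
--
--     normalized = []
--     for item in subtitles:
--         lan = str(item.get("lan") or "").strip()
--         lan_doc = str(item.get("lan_doc") or "").strip()
--         normalized.append((lan, lan_doc, item))
--
--     for target in _LANGUAGE_PRIORITY:
--         for lan, _, item in normalized: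
--             if lan.lower() == target.lower():
--                 return item
--     return normalized[0][2]
-- ===== SOURCE B (Python) =====
-- _LANGUAGE_PRIORITY = ("zh-CN", "zh-Hans", "ai-zh")
--
-- def _pick_preferred_subtitle(subtitles):
--     if not subtitles:
--         return None
--     prio = [t.lower() for t in _LANGUAGE_PRIORITY]
--     best_item = None
--     best_rank = len(prio)
--     for item in subtitles:
--         lan = str(item.get("lan") or "").strip().lower()
--         rank = prio.index(lan) if lan in prio else len(prio)
--         if best_item is None or rank < best_rank:
--             best_item, best_rank = item, rank
--     return best_item
-- ===== Notes on version B (the rewrite author's own statement) =====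
-- stated objective: alternative
-- what changed: Replaces the nested priority-outer/entries-inner repeated scan with a single pass over the subtitles that keeps the first entry of minimal priority rank (rank = position of the lowercased lan in the lowercased priority list, or len(prio) if absent), the no-match fallback to the first entry falling out of the rank bound.
import Mathlib
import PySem

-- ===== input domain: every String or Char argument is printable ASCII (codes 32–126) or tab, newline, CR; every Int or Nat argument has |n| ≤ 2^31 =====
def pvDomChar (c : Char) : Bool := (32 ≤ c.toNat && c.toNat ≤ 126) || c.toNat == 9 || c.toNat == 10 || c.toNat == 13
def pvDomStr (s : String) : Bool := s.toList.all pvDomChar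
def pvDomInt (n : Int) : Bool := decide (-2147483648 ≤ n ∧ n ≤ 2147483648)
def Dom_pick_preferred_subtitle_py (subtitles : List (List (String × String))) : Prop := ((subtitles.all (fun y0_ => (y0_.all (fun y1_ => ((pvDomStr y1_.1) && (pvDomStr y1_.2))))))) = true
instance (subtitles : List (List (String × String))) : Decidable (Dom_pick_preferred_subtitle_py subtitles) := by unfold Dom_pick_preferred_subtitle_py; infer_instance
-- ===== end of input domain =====

-- B replaces A's nested priority-outer/entries-inner scans by one pass keeping the
-- first entry of minimal priority rank (objective: alternative decomposition).

-- ===== PORT A =====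
def pvLanguagePriority : List String := ["zh-CN", "zh-Hans", "ai-zh"]

-- inner 'for lan, _, item in normalized' loop of A
def pvFindLan (normalized : List (String × String × List (String × String))) (target : String) :
    Option (List (String × String)) :=
  match normalized with
  | [] => none
  | (lan, _, item) :: rest =>
    if PySem.Str.lower lan == PySem.Str.lower target then some item else pvFindLan rest target

-- outer 'for target in _LANGUAGE_PRIORITY' loop of A
def pvOuter (targets : List String) (normalized : List (String × String × List (String × String))) :
    Option (List (String × String)) :=
  match targets with
  | [] => none
  | t :: ts =>
    match pvFindLan normalized t with
    | some it => some it
    | none => pvOuter ts normalized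

-- the 'normalized' list built by A's first loop
def pvNormalize (subtitles : List (List (String × String))) :
    List (String × String × List (String × String)) :=
  subtitles.map (fun item =>
    (PySem.Str.strip (PySem.Dict.getD (PySem.Dict.mk item) "lan" ""),
     PySem.Str.strip (PySem.Dict.getD (PySem.Dict.mk item) "lan_doc" ""), item))

def pick_preferred_subtitle_py (subtitles : List (List (String × String))) :
    Option (List (String × String)) :=
  match subtitles with
  | [] => none
  | _ :: _ =>
    let normalized := pvNormalize subtitles
    match pvOuter pvLanguagePriority normalized with
    | some it => some it
    | none => some ((normalized.headD ("", "", [])).2.2)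

-- ===== PORT B =====
def pvPrio : List String := pvLanguagePriority.map PySem.Str.lower

-- 'prio.index(lan) if lan in prio else len(prio)'
def pvRankB (prio : List String) (lan : String) : Nat :=
  if prio.contains lan then (PySem.List.index? prio lan).getD prio.length else prio.length

-- the body of B's single loop (state: best_item, best_rank)
def pvStep (acc : Option (List (String × String)) × Nat) (item : List (String × String)) :
    Option (List (String × String)) × Nat :=
  let lan := PySem.Str.lower (PySem.Str.strip (PySem.Dict.getD (PySem.Dict.mk item) "lan" ""))
  let rank := pvRankB pvPrio lan
  match acc.1 with
  | none => (some item, rank)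
  | some _ => if rank < acc.2 then (some item, rank) else acc

def pick_preferred_subtitle_py_alt (subtitles : List (List (String × String))) :
    Option (List (String × String)) :=
  match subtitles with
  | [] => none
  | _ :: _ => (subtitles.foldl pvStep (none, pvPrio.length)).1

-- ===== PRECONDITION & SPEC =====
def Spec_pick_preferred_subtitle_py (subtitles : List (List (String × String))) (out : Option (List (String × String))) : Prop := out = pick_preferred_subtitle_py_alt subtitles
instance (subtitles : List (List (String × String))) (out : Option (List (String × String))) : Decidable (Spec_pick_preferred_subtitle_py subtitles out) := by unfold Spec_pick_preferred_subtitle_py; infer_instance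

-- ===== CLAIM (what is proved, stated in full; the proofs are below) =====
def Claim_equal_pick_preferred_subtitle_py : Prop := ∀ (subtitles : List (List (String × String))), Dom_pick_preferred_subtitle_py subtitles → Spec_pick_preferred_subtitle_py subtitles (pick_preferred_subtitle_py subtitles)

-- ===== LEMMAS AND PROOFS =====
def pvLow (item : List (String × String)) : String :=
  PySem.Str.lower (PySem.Str.strip (PySem.Dict.getD (PySem.Dict.mk item) "lan" ""))

-- proof-side rank: explicit four-way case split
def pvRk (item : List (String × String)) : Nat :=
  if pvLow item = "zh-cn" then 0
  else if pvLow item = "zh-hans" then 1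
  else if pvLow item = "ai-zh" then 2
  else 3

lemma pvRk_le (x : List (String × String)) : pvRk x ≤ 3 := by
  unfold pvRk; split_ifs <;> omega

lemma pvPrio_eq : pvPrio = ["zh-cn", "zh-hans", "ai-zh"] := by decide

lemma rank_eq (x : List (String × String)) : pvRankB pvPrio (pvLow x) = pvRk x := by
  rw [pvRankB, pvPrio_eq, pvRk]
  by_cases h0 : pvLow x = "zh-cn" <;> by_cases h1 : pvLow x = "zh-hans" <;>
    by_cases h2 : pvLow x = "ai-zh" <;>
    simp_all [PySem.List.index?_eq_idxOf?, List.idxOf?, List.findIdx?, List.findIdx?.go]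

lemma pvStep_none (x : List (String × String)) (r : Nat) :
    pvStep (none, r) x = (some x, pvRk x) := by
  simp [pvStep, ← rank_eq, pvLow]

lemma pvStep_some (b : List (String × String)) (r : Nat) (x : List (String × String)) :
    pvStep (some b, r) x = if pvRk x < r then (some x, pvRk x) else (some b, r) := by
  simp [pvStep, ← rank_eq, pvLow]

-- first entry of minimal rank, with its rank
def pvBest (l : List (List (String × String))) : Option (List (String × String)) × Nat :=
  match l with
  | [] => (none, 3)
  | x :: r =>
    let b := pvBest r
    if b.2 < pvRk x then b else (some x, pvRk x)

lemma fold_eq (l : List (List (String × String))) (b0 : List (String × String)) (r0 : Nat)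
    (h : r0 ≤ 3) :
    l.foldl pvStep (some b0, r0) = if (pvBest l).2 < r0 then pvBest l else (some b0, r0) := by
  induction l generalizing b0 r0 with
  | nil =>
    have h3 : ¬ (3 < r0) := by omega
    simp [pvBest, h3]
  | cons x r ih =>
    simp only [List.foldl_cons, pvStep_some, pvBest]
    rcases hbr : pvBest r with ⟨b, rb⟩
    by_cases hx : pvRk x < r0
    · rw [if_pos hx, ih x (pvRk x) (pvRk_le x), hbr]
      by_cases hb : rb < pvRk x
      · simp [hb, show rb < r0 by omega]
      · simp [hb, hx]
    · rw [if_neg hx, ih b0 r0 h, hbr]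
      by_cases hb : rb < pvRk x
      · simp [hb]
      · simp [hb, show ¬ rb < r0 by omega, show ¬ pvRk x < r0 by omega]

lemma find_cons (x : List (String × String)) (r : List (List (String × String))) (t : String) :
    pvFindLan (pvNormalize (x :: r)) t =
      if PySem.Str.lower (PySem.Str.strip (PySem.Dict.getD (PySem.Dict.mk x) "lan" "")) == PySem.Str.lower t
      then some x else pvFindLan (pvNormalize r) t := by
  simp [pvNormalize, pvFindLan]

lemma key (l : List (List (String × String))) :
    pvBest l =
      match pvFindLan (pvNormalize l) "zh-CN" with
      | some a => (some a, 0)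
      | none =>
        match pvFindLan (pvNormalize l) "zh-Hans" with
        | some a => (some a, 1)
        | none =>
          match pvFindLan (pvNormalize l) "ai-zh" with
          | some a => (some a, 2)
          | none => (l.head?, 3) := by
  induction l with
  | nil => simp [pvBest, pvNormalize, pvFindLan]
  | cons x r ih =>
    have h0' : PySem.Str.lower "zh-CN" = "zh-cn" := by decide
    have h1' : PySem.Str.lower "zh-Hans" = "zh-hans" := by decide
    have h2' : PySem.Str.lower "ai-zh" = "ai-zh" := by decide
    rw [pvBest, ih]
    rw [find_cons, find_cons, find_cons, h0', h1', h2']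
    have hL : PySem.Str.lower (PySem.Str.strip (PySem.Dict.getD (PySem.Dict.mk x) "lan" "")) = pvLow x := rfl
    rw [hL]
    by_cases h0 : pvLow x = "zh-cn"
    · have hr : pvRk x = 0 := by simp [pvRk, h0]
      rcases e0 : pvFindLan (pvNormalize r) "zh-CN" with _ | a <;>
        rcases e1 : pvFindLan (pvNormalize r) "zh-Hans" with _ | b <;>
        rcases e2 : pvFindLan (pvNormalize r) "ai-zh" with _ | c <;>
        simp [h0, hr]
    · by_cases h1 : pvLow x = "zh-hans"
      · have hr : pvRk x = 1 := by simp [pvRk, h0, h1]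
        rcases e0 : pvFindLan (pvNormalize r) "zh-CN" with _ | a <;>
          rcases e1 : pvFindLan (pvNormalize r) "zh-Hans" with _ | b <;>
          rcases e2 : pvFindLan (pvNormalize r) "ai-zh" with _ | c <;>
          simp [h0, h1, hr]
      · by_cases h2 : pvLow x = "ai-zh"
        · have hr : pvRk x = 2 := by simp [pvRk, h0, h1, h2]
          rcases e0 : pvFindLan (pvNormalize r) "zh-CN" with _ | a <;>
            rcases e1 : pvFindLan (pvNormalize r) "zh-Hans" with _ | b <;>
            rcases e2 : pvFindLan (pvNormalize r) "ai-zh" with _ | c <;>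
            simp [h0, h1, h2, hr]
        · have hr : pvRk x = 3 := by simp [pvRk, h0, h1, h2]
          rcases e0 : pvFindLan (pvNormalize r) "zh-CN" with _ | a <;>
            rcases e1 : pvFindLan (pvNormalize r) "zh-Hans" with _ | b <;>
            rcases e2 : pvFindLan (pvNormalize r) "ai-zh" with _ | c <;>
            simp [h0, h1, h2, hr]

lemma alt_eq_best (x : List (String × String)) (r : List (List (String × String))) :
    pick_preferred_subtitle_py_alt (x :: r) = (pvBest (x :: r)).1 := by
  have hlen : pvPrio.length = 3 := by decide
  simp only [pick_preferred_subtitle_py_alt, List.foldl_cons, hlen, pvStep_none]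
  rw [fold_eq r x (pvRk x) (pvRk_le x)]
  rcases hbr : pvBest r with ⟨b, rb⟩
  simp only [pvBest, hbr]

-- ===== VERDICT (by name: the statement is the Claim_ definition above) =====
theorem pick_preferred_subtitle_py_spec : Claim_equal_pick_preferred_subtitle_py := by
  intro subtitles _
  unfold Spec_pick_preferred_subtitle_py
  cases subtitles with
  | nil => rfl
  | cons x r =>
    rw [alt_eq_best]
    have hk := key (x :: r)
    simp only [pick_preferred_subtitle_py, pvOuter, pvLanguagePriority]
    rcases e0 : pvFindLan (pvNormalize (x :: r)) "zh-CN" with _ | a <;>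
      rcases e1 : pvFindLan (pvNormalize (x :: r)) "zh-Hans" with _ | b <;>
      rcases e2 : pvFindLan (pvNormalize (x :: r)) "ai-zh" with _ | c <;>
      rw [e0, e1, e2] at hk <;> simp [hk, pvNormalize]
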